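-- pv_equiv track=rewrite | github.com/antonio-030/SentinatlCraw | src/api/agent_memory_routes.py | _clean_memory_output
-- ===== SOURCE A (Python) =====
-- def _clean_memory_output(output: str) -> str:
--     """Entfernt Frontmatter und kürzt Pfade aus dem Memory-Output."""
--     clean_lines: list[str] = []
--     in_frontmatter = False
--
--     for line in output.splitlines():
--         if line.strip() == "---":
--             in_frontmatter = not in_frontmatter
--             continue
--         if in_frontmatter:
--             continue
--         if line.startswith("### /sandbox/"):
--             clean_lines.append(f"### {line.split('/')[-1]}")
--         else:
--             clean_lines.append(line)
--
--     return "\n".join(clean_lines).strip()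
-- ===== SOURCE B (Python) =====
-- def _clean_memory_output(output: str) -> str:
--     """Mutual recursion over the line list (keep-mode / skip-mode) instead of a loop with a toggle flag."""
--     def keep(lines):
--         if not lines:
--             return []
--         line, rest = lines[0], lines[1:]
--         if line.strip() == "---":
--             return skip(rest)
--         if line.startswith("### /sandbox/"):
--             return ["### " + line.split("/")[-1]] + keep(rest)
--         return [line] + keep(rest)
--
--     def skip(lines):
--         if not lines:
--             return []
--         if lines[0].strip() == "---":
--             return keep(lines[1:])
--         return skip(lines[1:])
--
--     return "\n".join(keep(output.splitlines())).strip()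
-- ===== Notes on version B (the rewrite author's own statement) =====
-- stated objective: alternative
-- what changed: Replaces the single loop with a mutable in_frontmatter toggle and an accumulator list by a pair of mutually recursive functions (keep-mode / skip-mode) over the line list, so no boolean state is threaded at all.
import Mathlib
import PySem

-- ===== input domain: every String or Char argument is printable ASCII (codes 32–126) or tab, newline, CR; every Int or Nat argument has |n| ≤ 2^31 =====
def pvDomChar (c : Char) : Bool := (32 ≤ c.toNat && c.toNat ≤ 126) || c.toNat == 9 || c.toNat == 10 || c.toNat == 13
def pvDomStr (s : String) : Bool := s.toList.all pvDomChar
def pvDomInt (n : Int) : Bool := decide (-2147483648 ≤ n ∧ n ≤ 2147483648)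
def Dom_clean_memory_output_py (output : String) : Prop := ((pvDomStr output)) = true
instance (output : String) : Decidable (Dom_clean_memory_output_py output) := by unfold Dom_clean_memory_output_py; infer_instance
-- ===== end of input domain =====

-- B replaces A's toggle-flag loop by mutual keep/skip recursion over the line list; return values agree everywhere.
-- ===== PORT A =====
-- shared faithful transliteration of the line rewrite both Pythons perform on "### /sandbox/" lines
def pvSandboxLine (line : String) : String :=
  "### " ++ (((PySem.Str.split? line "/").getD []).getLastD "")

def clean_memory_output_py (output : String) : String :=
  PySem.Str.strip (PySem.Str.join "\n"
    ((PySem.Str.splitlines output).foldl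
    (fun (st : List String × Bool) (line : String) =>
      if PySem.Str.strip line == "---" then (st.1, !st.2)
      else if st.2 then st
      else if PySem.Str.startswith line "### /sandbox/" then (st.1 ++ [pvSandboxLine line], st.2)
      else (st.1 ++ [line], st.2))
    ([], false)).1)

-- ===== PORT B =====
mutual
def pvKeep : List String → List String
  | [] => []
  | line :: rest =>
    if PySem.Str.strip line == "---" then pvSkip rest
    else if PySem.Str.startswith line "### /sandbox/" then pvSandboxLine line :: pvKeep rest
    else line :: pvKeep rest
def pvSkip : List String → List String
  | [] => []
  | line :: rest =>
    if PySem.Str.strip line == "---" then pvKeep rest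
    else pvSkip rest
end

def clean_memory_output_py_alt (output : String) : String :=
  PySem.Str.strip (PySem.Str.join "\n" (pvKeep (PySem.Str.splitlines output)))

-- ===== PRECONDITION & SPEC =====
def Spec_clean_memory_output_py (output : String) (out : String) : Prop := out = clean_memory_output_py_alt output
instance (output : String) (out : String) : Decidable (Spec_clean_memory_output_py output out) := by unfold Spec_clean_memory_output_py; infer_instance

-- ===== CLAIM (what is proved, stated in full; the proofs are below) =====
def Claim_equal_clean_memory_output_py : Prop := ∀ (output : String), Dom_clean_memory_output_py output → Spec_clean_memory_output_py output (clean_memory_output_py output)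

-- ===== LEMMAS AND PROOFS =====

theorem pv_fold_eq (ls : List String) : ∀ (acc : List String),
    (ls.foldl
      (fun (st : List String × Bool) (line : String) =>
        if PySem.Str.strip line == "---" then (st.1, !st.2)
        else if st.2 then st
        else if PySem.Str.startswith line "### /sandbox/" then (st.1 ++ [pvSandboxLine line], st.2)
        else (st.1 ++ [line], st.2))
      (acc, false)).1 = acc ++ pvKeep ls
  ∧ (ls.foldl
      (fun (st : List String × Bool) (line : String) =>
        if PySem.Str.strip line == "---" then (st.1, !st.2)
        else if st.2 then st
        else if PySem.Str.startswith line "### /sandbox/" then (st.1 ++ [pvSandboxLine line], st.2)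
        else (st.1 ++ [line], st.2))
      (acc, true)).1 = acc ++ pvSkip ls := by
  induction ls with
  | nil => intro acc; simp [pvKeep, pvSkip]
  | cons line rest ih =>
    intro acc
    refine ⟨?_, ?_⟩ <;>
    · simp only [List.foldl_cons, pvKeep, pvSkip, Bool.not_false, Bool.not_true]
      split_ifs <;>
        simp_all [(ih acc).1, (ih acc).2, (ih (acc ++ [pvSandboxLine line])).1,
          (ih (acc ++ [line])).1]

-- ===== VERDICT (by name: the statement is the Claim_ definition above) =====
theorem clean_memory_output_py_spec : Claim_equal_clean_memory_output_py := by
  intro output _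
  unfold Spec_clean_memory_output_py clean_memory_output_py clean_memory_output_py_alt
  rw [(pv_fold_eq (PySem.Str.splitlines output) []).1]
  rfl
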